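-- pv_equiv track=rewrite | github.com/sitcon-tw/camp2025-stock | backend/app/domain/trading/data_services.py | _aggregate_orders_by_price
-- ===== SOURCE A (Python) =====
-- from typing import List, Dict, Any
--
-- def _aggregate_orders_by_price(orders: List[Dict[str, Any]], reverse: bool = False) -> List[Dict[str, Any]]:
--     """
--     按價格聚合訂單
--     領域邏輯：將同一價格的訂單數量合併
--     """
--     price_map = {}
--
--     for order in orders:
--         price = order["price"]
--         quantity = order["quantity"]
--
--         if price in price_map:
--             price_map[price] += quantity
--         else:
--             price_map[price] = quantity
--
--     # 轉換為列表並排序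
--     aggregated = [
--         {"price": price, "quantity": quantity}
--         for price, quantity in price_map.items()
--     ]
--
--     # 排序：買單按價格降序，賣單按價格升序
--     aggregated.sort(key=lambda x: x["price"], reverse=reverse)
--
--     return aggregated
-- ===== SOURCE B (Python) =====
-- def _aggregate_orders_by_price(orders, reverse=False):
--     # Sort orders by price first, then aggregate adjacent equal-price runs in one pass.
--     ordered = sorted(orders, key=lambda o: o["price"], reverse=reverse)
--     result = []
--     for o in ordered:
--         price = o["price"]
--         quantity = o["quantity"]
--         if result and result[-1]["price"] == price:
--             result[-1]["quantity"] += quantity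
--         else:
--             result.append({"price": price, "quantity": quantity})
--     return result
-- ===== Notes on version B (the rewrite author's own statement) =====
-- stated objective: alternative
-- what changed: Replaced the price->quantity hash-map aggregation followed by a sort of the aggregate with a sort of the raw orders followed by a single adjacent-run grouping pass (no dict at all).
import Mathlib
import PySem

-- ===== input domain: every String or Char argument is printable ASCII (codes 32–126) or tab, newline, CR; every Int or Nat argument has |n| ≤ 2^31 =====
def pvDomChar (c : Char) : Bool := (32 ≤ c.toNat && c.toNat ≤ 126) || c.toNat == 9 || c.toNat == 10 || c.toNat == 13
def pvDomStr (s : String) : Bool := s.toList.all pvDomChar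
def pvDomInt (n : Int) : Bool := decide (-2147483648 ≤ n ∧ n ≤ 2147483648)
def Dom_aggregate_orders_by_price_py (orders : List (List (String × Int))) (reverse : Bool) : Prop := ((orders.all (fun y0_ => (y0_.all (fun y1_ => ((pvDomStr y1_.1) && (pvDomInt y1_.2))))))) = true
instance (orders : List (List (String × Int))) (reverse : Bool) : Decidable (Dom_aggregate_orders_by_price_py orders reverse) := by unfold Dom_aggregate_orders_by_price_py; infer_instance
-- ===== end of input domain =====

-- B sorts the raw orders by price and aggregates adjacent equal-price runs in one pass, instead of
-- A's price->quantity dict followed by a sort of the aggregate; return values agree on Pre_.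


-- order[k] for an order dict; Pre_ guarantees the key is present, so the .getD default is never read
def pvGet (o : List (String × Int)) (k : String) : Int := ((PySem.Dict.ofList o).get? k).getD 0

-- ===== PORT A =====
def aggregate_orders_by_price_py (orders : List (List (String × Int))) (reverse : Bool) : List (List (String × Int)) :=
  let price_map := orders.foldl (fun d order =>
    let price := pvGet order "price"
    let quantity := pvGet order "quantity"
    if d.contains price then d.insert price (d.getD price 0 + quantity)
    else d.insert price quantity) PySem.Dict.empty
  let aggregated := price_map.items.map (fun pq => [("price", pq.1), ("quantity", pq.2)])
  PySem.List.sorted aggregated (fun x => pvGet x "price") reverse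

-- ===== PORT B =====
-- one step of B's grouping loop; the accumulator is B's `result` list held in reverse (head = result[-1])
def pvStepB (acc : List (Int × Int)) (o : List (String × Int)) : List (Int × Int) :=
  let p := pvGet o "price"
  let q := pvGet o "quantity"
  match acc with
  | (p', q') :: rest => if p' = p then (p', q' + q) :: rest else (p, q) :: (p', q') :: rest
  | [] => [(p, q)]

def aggregate_orders_by_price_py_alt (orders : List (List (String × Int))) (reverse : Bool) : List (List (String × Int)) :=
  let ordered := PySem.List.sorted orders (fun o => pvGet o "price") reverse
  let grouped := ordered.foldl pvStepB []
  grouped.reverse.map (fun pq => [("price", pq.1), ("quantity", pq.2)])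

-- ===== PRECONDITION & SPEC =====
-- Pre_ excludes exactly the inputs where the Python raises KeyError: an order missing "price" or "quantity"
def Pre_aggregate_orders_by_price_py (orders : List (List (String × Int))) (reverse : Bool) : Prop :=
  ∀ o ∈ orders, (PySem.Dict.ofList o).contains "price" = true ∧ (PySem.Dict.ofList o).contains "quantity" = true
instance (orders : List (List (String × Int))) (reverse : Bool) : Decidable (Pre_aggregate_orders_by_price_py orders reverse) := by unfold Pre_aggregate_orders_by_price_py; infer_instance
def pvWitness_aggregate_orders_by_price_py : (List (List (String × Int))) × Bool :=
  ([[("price", 3), ("quantity", 2)], [("price", 1), ("quantity", 5)], [("price", 3), ("quantity", 1)]], false)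

def Spec_aggregate_orders_by_price_py (orders : List (List (String × Int))) (reverse : Bool) (out : List (List (String × Int))) : Prop := out = aggregate_orders_by_price_py_alt orders reverse
instance (orders : List (List (String × Int))) (reverse : Bool) (out : List (List (String × Int))) : Decidable (Spec_aggregate_orders_by_price_py orders reverse out) := by unfold Spec_aggregate_orders_by_price_py; infer_instance

-- ===== CLAIM (what is proved, stated in full; the proofs are below) =====
def Claim_equal_aggregate_orders_by_price_py : Prop := ∀ (orders : List (List (String × Int))) (reverse : Bool), Dom_aggregate_orders_by_price_py orders reverse → Pre_aggregate_orders_by_price_py orders reverse → Spec_aggregate_orders_by_price_py orders reverse (aggregate_orders_by_price_py orders reverse)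

-- ===== LEMMAS AND PROOFS =====
def keyO (o : List (String × Int)) : Int := pvGet o "price"
def qtyO (o : List (String × Int)) : Int := pvGet o "quantity"
-- total quantity of l at price p
def total (l : List (List (String × Int))) (p : Int) : Int := ((l.filter (fun o => keyO o == p)).map qtyO).sum
-- the output-dict wrapper both ports apply
def wrapP (pq : Int × Int) : List (String × Int) := [("price", pq.1), ("quantity", pq.2)]

theorem total_nil (p : Int) : total [] p = 0 := rfl

theorem total_cons (o : List (String × Int)) (l : List (List (String × Int))) (p : Int) :
    total (o :: l) p = (if keyO o = p then qtyO o else 0) + total l p := by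
  by_cases h : keyO o = p <;> simp [total, h]

theorem kf_wrap (pq : Int × Int) : pvGet (wrapP pq) "price" = pq.1 := rfl

-- B's grouping loop in direct recursive style: current run has price p and accumulated quantity q
def runsAux (p q : Int) : List (List (String × Int)) → List (Int × Int)
  | [] => [(p, q)]
  | o :: rest => if p = keyO o then runsAux p (q + qtyO o) rest
                 else (p, q) :: runsAux (keyO o) (qtyO o) rest

def runs : List (List (String × Int)) → List (Int × Int)
  | [] => []
  | o :: rest => runsAux (keyO o) (qtyO o) rest

theorem foldl_stepB_eq (rest : List (List (String × Int))) :
    ∀ p q acc, rest.foldl pvStepB ((p, q) :: acc) = (runsAux p q rest).reverse ++ acc := by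
  induction rest with
  | nil => intro p q acc; simp [runsAux]
  | cons o rest ih =>
    intro p q acc
    rw [List.foldl_cons]
    show List.foldl pvStepB
        (if p = keyO o then (p, q + qtyO o) :: acc else (keyO o, qtyO o) :: (p, q) :: acc) rest = _
    by_cases h : p = keyO o
    · rw [if_pos h, runsAux, if_pos h, ih]
    · rw [if_neg h, runsAux, if_neg h, ih]
      simp

theorem grouped_eq_runs (l : List (List (String × Int))) :
    (l.foldl pvStepB []).reverse = runs l := by
  cases l with
  | nil => simp [runs]
  | cons o rest =>
    have h0 : (o :: rest).foldl pvStepB [] = rest.foldl pvStepB [(keyO o, qtyO o)] := by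
      simp [List.foldl, pvStepB, keyO, qtyO]
    rw [h0, foldl_stepB_eq rest (keyO o) (qtyO o) [], runs]
    simp

-- invariant of B's grouping pass, generic in the order relation r (≤ for ascending, ≥ for descending)
theorem runsAux_spec (r : Int → Int → Prop)
    (hrefl : ∀ a, r a a)
    (htrans : ∀ a b c, r a b → r b c → r a c)
    (hanti : ∀ a b, r a b → r b a → a = b) :
    ∀ (rest : List (List (String × Int))) (p q : Int),
      rest.Pairwise (fun a b => r (keyO a) (keyO b)) →
      (∀ o ∈ rest, r p (keyO o)) →
      ((∀ p' v, ((p', v) ∈ runsAux p q rest ↔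
          (p' = p ∧ v = q + total rest p) ∨
          (p' ≠ p ∧ p' ∈ rest.map keyO ∧ v = total rest p')))
       ∧ (runsAux p q rest).Pairwise (fun x y => r x.1 y.1 ∧ x.1 ≠ y.1)
       ∧ (∀ x ∈ runsAux p q rest, r p x.1)) := by
  intro rest
  induction rest with
  | nil =>
    intro p q _ _
    exact ⟨by intro p' v; simp [runsAux, total_nil], by simp [runsAux], by simp [runsAux, hrefl]⟩
  | cons o rest ih =>
    intro p q hpw hall
    have ho := (List.pairwise_cons.mp hpw).1
    have hpw' := (List.pairwise_cons.mp hpw).2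
    have hmcons : ∀ p' : Int, p' ∈ (o :: rest).map keyO ↔ (p' = keyO o ∨ p' ∈ rest.map keyO) := by
      intro p'; simp
    by_cases h : p = keyO o
    · -- equal price: merge into the current run
      have hall' : ∀ o' ∈ rest, r p (keyO o') := fun o' ho' => h ▸ ho o' ho'
      obtain ⟨hmem, hpwres, hub⟩ := ih p (q + qtyO o) hpw' hall'
      have ht1 : total (o :: rest) p = qtyO o + total rest p := by
        rw [total_cons, if_pos h.symm]
      refine ⟨?_, by rw [runsAux, if_pos h]; exact hpwres, by rw [runsAux, if_pos h]; exact hub⟩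
      intro p' v
      rw [runsAux, if_pos h, hmem p' v]
      constructor
      · rintro (⟨h1, h2⟩ | ⟨h1, h2, h3⟩)
        · exact Or.inl ⟨h1, by rw [ht1]; omega⟩
        · have hne : keyO o ≠ p' := fun e => h1 (h.trans e).symm
          refine Or.inr ⟨h1, (hmcons p').mpr (Or.inr h2), ?_⟩
          rw [total_cons, if_neg hne]; omega
      · rintro (⟨h1, h2⟩ | ⟨h1, h2, h3⟩)
        · exact Or.inl ⟨h1, by rw [ht1] at h2; omega⟩
        · have hne : keyO o ≠ p' := fun e => h1 (h.trans e).symm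
          rw [total_cons, if_neg hne] at h3
          refine Or.inr ⟨h1, ?_, by omega⟩
          rcases (hmcons p').mp h2 with h2 | h2
          · exact absurd h2.symm hne
          · exact h2
    · -- new price: close the current run and start a new one
      have hro : r p (keyO o) := hall o List.mem_cons_self
      obtain ⟨hmem, hpwres, hub⟩ := ih (keyO o) (qtyO o) hpw' ho
      have hnp : ∀ o' ∈ (o :: rest), keyO o' ≠ p := by
        intro o' ho'
        rcases List.mem_cons.mp ho' with he | ho'
        · exact he ▸ fun e => h e.symm
        · exact fun e => h (hanti p (keyO o) hro (e ▸ ho o' ho'))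
      have htp : total (o :: rest) p = 0 := by
        have hf : (o :: rest).filter (fun o => keyO o == p) = [] := by
          apply List.filter_eq_nil_iff.mpr
          intro o' ho'; simpa using hnp o' ho'
        simp [total, hf]
      have htail : ∀ x ∈ runsAux (keyO o) (qtyO o) rest, r p x.1 ∧ p ≠ x.1 := by
        intro x hx
        have h1 : r (keyO o) x.1 := hub x hx
        exact ⟨htrans _ _ _ hro h1, fun e => h (hanti p (keyO o) hro (e ▸ h1))⟩
      refine ⟨?_, ?_, ?_⟩
      · intro p' v
        rw [runsAux, if_neg h]
        constructor
        · intro hv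
          rcases List.mem_cons.mp hv with hv | hv
          · obtain ⟨hp1, hp2⟩ : p' = p ∧ v = q := by simpa using hv
            exact Or.inl ⟨hp1, by rw [htp]; omega⟩
          · rcases (hmem p' v).mp hv with ⟨h1, h2⟩ | ⟨h1, h2, h3⟩
            · refine Or.inr ⟨fun e => hnp o List.mem_cons_self (h1.symm.trans e), (hmcons p').mpr (Or.inl h1), ?_⟩
              rw [h1, total_cons, if_pos rfl]; omega
            · have hne' : p' ≠ p := by
                intro e; subst e
                rcases h2 with h2
                obtain ⟨o', ho', he⟩ := List.mem_map.mp h2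
                exact hnp o' (List.mem_cons_of_mem _ ho') he
              refine Or.inr ⟨hne', (hmcons p').mpr (Or.inr h2), ?_⟩
              rw [total_cons, if_neg (fun e => h1 e.symm)]; omega
        · rintro (⟨h1, h2⟩ | ⟨h1, h2, h3⟩)
          · rw [htp] at h2
            have hvq : v = q := by omega
            exact List.mem_cons.mpr (Or.inl (by rw [h1, hvq]))
          · apply List.mem_cons_of_mem
            apply (hmem p' v).mpr
            by_cases he : p' = keyO o
            · subst he
              rw [total_cons, if_pos rfl] at h3
              exact Or.inl ⟨rfl, by omega⟩
            · rcases (hmcons p').mp h2 with h2 | h2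
              · exact absurd h2 he
              · rw [total_cons, if_neg (fun e => he e.symm)] at h3
                exact Or.inr ⟨he, h2, by omega⟩
      · rw [runsAux, if_neg h]
        exact List.pairwise_cons.mpr ⟨fun x hx => htail x hx, hpwres⟩
      · rw [runsAux, if_neg h]
        intro x hx
        rcases List.mem_cons.mp hx with hx | hx
        · rw [hx]; exact hrefl p
        · exact (htail x hx).1

theorem runs_mem (r : Int → Int → Prop)
    (hrefl : ∀ a, r a a) (htrans : ∀ a b c, r a b → r b c → r a c)
    (hanti : ∀ a b, r a b → r b a → a = b)
    (l : List (List (String × Int))) (hpw : l.Pairwise (fun a b => r (keyO a) (keyO b)))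
    (p v : Int) : (p, v) ∈ runs l ↔ p ∈ l.map keyO ∧ v = total l p := by
  cases l with
  | nil => simp [runs]
  | cons o rest =>
    have ho := (List.pairwise_cons.mp hpw).1
    have hpw' := (List.pairwise_cons.mp hpw).2
    obtain ⟨hmem, _, _⟩ := runsAux_spec r hrefl htrans hanti rest (keyO o) (qtyO o) hpw' ho
    rw [runs, hmem p v]
    constructor
    · rintro (⟨h1, h2⟩ | ⟨h1, h2, h3⟩)
      · subst h1
        exact ⟨by simp, by rw [total_cons, if_pos rfl]; omega⟩
      · refine ⟨?_, by rw [total_cons, if_neg (fun e => h1 e.symm)]; omega⟩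
        rw [List.map_cons]
        exact List.mem_cons_of_mem _ h2
    · rintro ⟨h1, h2⟩
      by_cases he : p = keyO o
      · left; subst he; rw [total_cons, if_pos rfl] at h2; exact ⟨rfl, by omega⟩
      · right
        have h1' : p ∈ rest.map keyO := by
          rw [List.map_cons] at h1
          rcases List.mem_cons.mp h1 with h1 | h1
          · exact absurd h1 he
          · exact h1
        rw [total_cons, if_neg (fun e => he e.symm)] at h2
        exact ⟨he, h1', by omega⟩

theorem runs_pairwise (r : Int → Int → Prop)
    (hrefl : ∀ a, r a a) (htrans : ∀ a b c, r a b → r b c → r a c)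
    (hanti : ∀ a b, r a b → r b a → a = b)
    (l : List (List (String × Int))) (hpw : l.Pairwise (fun a b => r (keyO a) (keyO b))) :
    (runs l).Pairwise (fun x y => r x.1 y.1 ∧ x.1 ≠ y.1) := by
  cases l with
  | nil => simp [runs]
  | cons o rest =>
    obtain ⟨_, h, _⟩ := runsAux_spec r hrefl htrans hanti rest (keyO o) (qtyO o)
      (List.pairwise_cons.mp hpw).2 (List.pairwise_cons.mp hpw).1
    exact h

-- ===== A's dict loop =====
def stepM (d : PySem.Dict Int Int) (o : List (String × Int)) : PySem.Dict Int Int :=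
  d.modify (keyO o) 0 (· + qtyO o)

theorem stepA_eq_stepM (d : PySem.Dict Int Int) (o : List (String × Int)) :
    (if d.contains (pvGet o "price") then d.insert (pvGet o "price") (d.getD (pvGet o "price") 0 + pvGet o "quantity")
     else d.insert (pvGet o "price") (pvGet o "quantity")) = stepM d o := by
  by_cases h : d.contains (pvGet o "price")
  · rw [if_pos h]; rfl
  · rw [if_neg h]
    show _ = d.insert (keyO o) (d.getD (keyO o) 0 + qtyO o)
    rw [PySem.Dict.getD_of_not_contains d 0 (by simpa [keyO] using h)]
    simp [keyO, qtyO]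

theorem getD_fold (l : List (List (String × Int))) :
    ∀ (d : PySem.Dict Int Int) (p : Int),
      (l.foldl stepM d).getD p 0 = d.getD p 0 + total l p := by
  induction l with
  | nil => intro d p; simp [total_nil]
  | cons o rest ih =>
    intro d p
    rw [List.foldl_cons, ih, total_cons]
    show (d.modify (keyO o) 0 (· + qtyO o)).getD p 0 + total rest p = _
    rw [PySem.Dict.getD_modify]
    by_cases h : p = keyO o
    · rw [if_pos h, if_pos h.symm, h]; omega
    · rw [if_neg h, if_neg (fun e => h e.symm)]; omega

theorem contains_fold (l : List (List (String × Int))) :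
    ∀ (d : PySem.Dict Int Int) (p : Int),
      (l.foldl stepM d).contains p = (decide (p ∈ l.map keyO) || d.contains p) := by
  induction l with
  | nil => intro d p; simp
  | cons o rest ih =>
    intro d p
    rw [List.foldl_cons, ih]
    show (decide (p ∈ rest.map keyO) || (d.modify (keyO o) 0 (· + qtyO o)).contains p) = _
    rw [PySem.Dict.contains_modify]
    by_cases h : p = keyO o
    · simp [h]
    · simp [beq_eq_false_iff_ne.mpr h, h]

theorem nodup_fold (l : List (List (String × Int))) :
    (l.foldl stepM PySem.Dict.empty).keys.Nodup := by
  have := PySem.Dict.nodup_keys_foldl_modify_key l keyO (0 : Int)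
    (fun _ o => (· + qtyO o)) PySem.Dict.empty (by simp [PySem.Dict.keys_empty])
  exact this

theorem mem_agg (l : List (List (String × Int))) (p v : Int) :
    (p, v) ∈ (l.foldl stepM PySem.Dict.empty).items ↔ p ∈ l.map keyO ∧ v = total l p := by
  rw [← PySem.Dict.get?_eq_some_iff_mem_items _ _ _ (nodup_fold l)]
  have hc := contains_fold l PySem.Dict.empty p
  have hg := getD_fold l PySem.Dict.empty p
  rw [PySem.Dict.contains_empty] at hc
  rw [PySem.Dict.getD_empty] at hg
  rw [PySem.Dict.getD_eq_get?_getD] at hg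
  rw [PySem.Dict.contains_eq_isSome_get?] at hc
  constructor
  · intro h
    rw [h] at hc hg
    simp at hc hg
    exact ⟨by simpa using hc, by omega⟩
  · rintro ⟨h1, h2⟩
    have : ((l.foldl stepM PySem.Dict.empty).get? p).isSome = true := by
      rw [hc]; simpa using h1
    obtain ⟨w, hw⟩ := Option.isSome_iff_exists.mp this
    rw [hw] at hg ⊢
    simp at hg
    have hwv : w = total l p := by omega
    rw [h2, hwv]

theorem nodup_runs (r : Int → Int → Prop)
    (hrefl : ∀ a, r a a) (htrans : ∀ a b c, r a b → r b c → r a c)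
    (hanti : ∀ a b, r a b → r b a → a = b)
    (l : List (List (String × Int))) (hpw : l.Pairwise (fun a b => r (keyO a) (keyO b))) :
    (runs l).Nodup := by
  have := runs_pairwise r hrefl htrans hanti l hpw
  exact List.Pairwise.imp (fun h e => h.2 (congrArg Prod.fst e)) this

theorem nodup_agg (l : List (List (String × Int))) : (l.foldl stepM PySem.Dict.empty).items.Nodup :=
  List.Nodup.of_map Prod.fst (nodup_fold l)

-- the central permutation: grouped runs of the sorted list ~ A's dict items
theorem runs_perm (r : Int → Int → Prop)
    (hrefl : ∀ a, r a a) (htrans : ∀ a b c, r a b → r b c → r a c)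
    (hanti : ∀ a b, r a b → r b a → a = b)
    (orders ordered : List (List (String × Int)))
    (hperm : ordered.Perm orders)
    (hpw : ordered.Pairwise (fun a b => r (keyO a) (keyO b))) :
    (runs ordered).Perm (orders.foldl stepM PySem.Dict.empty).items := by
  rw [List.perm_ext_iff_of_nodup (nodup_runs r hrefl htrans hanti ordered hpw) (nodup_agg orders)]
  rintro ⟨p, v⟩
  rw [runs_mem r hrefl htrans hanti ordered hpw p v, mem_agg orders p v]
  have hmem : p ∈ ordered.map keyO ↔ p ∈ orders.map keyO := (hperm.map keyO).mem_iff
  have htot : total ordered p = total orders p :=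
    ((hperm.filter (fun o => keyO o == p)).map qtyO).sum_eq
  rw [hmem, htot]

theorem main_eq (orders : List (List (String × Int))) (reverse : Bool) :
    aggregate_orders_by_price_py orders reverse = aggregate_orders_by_price_py_alt orders reverse := by
  have hstep : (fun (d : PySem.Dict Int Int) (order : List (String × Int)) =>
      let price := pvGet order "price"
      let quantity := pvGet order "quantity"
      if d.contains price then d.insert price (d.getD price 0 + quantity)
      else d.insert price quantity) = stepM := by
    funext d o; exact stepA_eq_stepM d o
  show PySem.List.sorted ((orders.foldl _ PySem.Dict.empty).items.map wrapP) (fun x => pvGet x "price") reverse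
      = ((PySem.List.sorted orders (fun o => pvGet o "price") reverse).foldl pvStepB []).reverse.map wrapP
  rw [hstep, grouped_eq_runs]
  cases reverse with
  | false =>
    apply PySem.List.sorted_eq_of_perm_of_pairwise_lt
    · exact (runs_perm (· ≤ ·) (fun a => le_refl a) (fun a b c => le_trans) (fun a b => le_antisymm)
        orders _ (PySem.List.sorted_perm orders (fun o => pvGet o "price") false)
        (PySem.List.sorted_pairwise orders (fun o => pvGet o "price"))).map wrapP
    · have := runs_pairwise (· ≤ ·) (fun a => le_refl a) (fun a b c => le_trans) (fun a b => le_antisymm)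
        _ (PySem.List.sorted_pairwise orders (fun o => pvGet o "price"))
      rw [List.pairwise_map]
      exact this.imp (fun h => by rw [kf_wrap, kf_wrap]; exact lt_of_le_of_ne h.1 h.2)
  | true =>
    apply PySem.List.sorted_rev_eq_of_perm_of_pairwise_gt
    · exact (runs_perm (fun a b => b ≤ a) (fun a => le_refl a) (fun a b c hab hbc => le_trans hbc hab)
        (fun a b hab hba => le_antisymm hba hab)
        orders _ (PySem.List.sorted_perm orders (fun o => pvGet o "price") true)
        (PySem.List.sorted_pairwise_rev orders (fun o => pvGet o "price"))).map wrapP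
    · have := runs_pairwise (fun a b => b ≤ a) (fun a => le_refl a) (fun a b c hab hbc => le_trans hbc hab)
        (fun a b hab hba => le_antisymm hba hab)
        _ (PySem.List.sorted_pairwise_rev orders (fun o => pvGet o "price"))
      rw [List.pairwise_map]
      exact this.imp (fun h => by rw [kf_wrap, kf_wrap]; exact lt_of_le_of_ne h.1 (fun e => h.2 e.symm))

-- ===== VERDICT (by name: the statement is the Claim_ definition above) =====
theorem aggregate_orders_by_price_py_spec : Claim_equal_aggregate_orders_by_price_py := by
  intro orders reverse _ _
  exact main_eq orders reverse
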